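-- pv_equiv track=rewrite | github.com/adlin-creation/implementation-algorithme-en-python-Matrice | algo_matrice.py | dichoto
-- ===== SOURCE A (Python) =====
-- def dichoto(M, id, if_, jd, jf, x):
--     """
--     Recherche binaire de l'indice d sur la diagonale principale de la sous-matrice.
--
--     Paramètres :
--     - M : matrice d'entiers respectant les conditions (I) et (II)
--     - id : indice de début des lignes
--     - if_ : indice de fin des lignes
--     - jd : indice de début des colonnes
--     - jf : indice de fin des colonnes
--     - x   : valeur entière recherchée
--
--     Retour :
--     - int : plus petit indice d tel que M[i_d + d, j_d + d] >= x
--     """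
--     n = min(if_ - id, jf - jd) + 1
--     g = 0
--     d = n
--     while g < d:
--         m = (g + d) // 2
--         if x <= M[id + m][jd + m]:
--             d = m
--         else:
--             g = m + 1
--     return g
-- ===== SOURCE B (Python) =====
-- def dichoto(M, id, if_, jd, jf, x):
--     n = min(if_ - id, jf - jd) + 1
--     return sum(1 for i in range(n) if M[id + i][jd + i] < x)
-- ===== Notes on version B (the rewrite author's own statement) =====
-- stated objective: alternative
-- what changed: Replaces the binary search with a count: on the non-decreasing diagonal the smallest index whose value reaches x equals the number of diagonal entries strictly below x, computed by one sum over range(n).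
-- outside the precondition, e.g. on dichoto([[5, 0], [0, 1]], 0, 1, 0, 1, 2): A returns 2, B returns 1; on dichoto([[1, 2], [3, 4]], 0, 2, 0, 2, 4): A returns 1, B raises IndexError
import Mathlib
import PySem

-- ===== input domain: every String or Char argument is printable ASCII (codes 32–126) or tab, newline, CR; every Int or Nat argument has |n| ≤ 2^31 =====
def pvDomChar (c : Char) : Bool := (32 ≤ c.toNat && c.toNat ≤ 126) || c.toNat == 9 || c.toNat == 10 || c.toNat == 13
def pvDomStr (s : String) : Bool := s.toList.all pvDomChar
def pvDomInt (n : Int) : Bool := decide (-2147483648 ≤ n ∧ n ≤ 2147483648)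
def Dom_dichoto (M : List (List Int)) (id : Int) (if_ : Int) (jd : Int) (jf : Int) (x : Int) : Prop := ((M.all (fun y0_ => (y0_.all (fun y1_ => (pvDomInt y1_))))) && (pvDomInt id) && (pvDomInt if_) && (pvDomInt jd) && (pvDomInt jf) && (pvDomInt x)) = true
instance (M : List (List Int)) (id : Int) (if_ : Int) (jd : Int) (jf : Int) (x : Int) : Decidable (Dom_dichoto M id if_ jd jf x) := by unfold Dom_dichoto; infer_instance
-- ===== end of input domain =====

-- B replaces A's binary search on the submatrix diagonal by counting the diagonal entries
-- strictly below x (on the non-decreasing diagonal Pre_ states, that count IS the smallest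
-- index whose value reaches x); they agree wherever Pre_ holds.

-- shared accessor: M[id+m][jd+m] as both Pythons write it; the getD defaults are never
-- reached inside Pre_ (every diagonal position is in range there), where it is exact.
def pvDiag (M : List (List Int)) (id : Int) (jd : Int) (m : Int) : Int :=
  (PySem.List.pyGet? ((PySem.List.pyGet? M (id + m)).getD []) (jd + m)).getD 0

-- ===== PORT A =====
def dichotoGo (M : List (List Int)) (id : Int) (jd : Int) (x : Int) (g : Int) (d : Int) : Int :=
  if h : g < d then
    if x ≤ pvDiag M id jd (PySem.Int.floordiv (g + d) 2) then
      dichotoGo M id jd x g (PySem.Int.floordiv (g + d) 2)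
    else dichotoGo M id jd x (PySem.Int.floordiv (g + d) 2 + 1) d
  else g
termination_by (d - g).toNat
decreasing_by
  · have h2 : PySem.Int.floordiv (g + d) 2 < d :=
      (PySem.Int.floordiv_lt_iff_lt_mul (by omega)).mpr (by omega)
    omega
  · have h1 := PySem.Int.floordiv_two_mid_bounds (le_of_lt h)
    omega

def dichoto (M : List (List Int)) (id : Int) (if_ : Int) (jd : Int) (jf : Int) (x : Int) : Int :=
  let n := min (if_ - id) (jf - jd) + 1
  dichotoGo M id jd x 0 n

-- ===== PORT B =====
-- sum(1 for i in range(n) if M[id+i][jd+i] < x): one fold over the range, adding 1 per hit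
def dichoto_alt (M : List (List Int)) (id : Int) (if_ : Int) (jd : Int) (jf : Int) (x : Int) : Int :=
  let n := min (if_ - id) (jf - jd) + 1
  (PySem.List.pyRange 0 n 1).foldl
    (fun acc i => if pvDiag M id jd i < x then acc + 1 else acc) 0

-- ===== PRECONDITION & SPEC =====
-- Pre_ excludes inputs violating A's documented conditions on the submatrix: some diagonal
-- position out of range (either Python may raise IndexError, or A's probes happen to miss it)
-- or a diagonal that is not non-decreasing, where the binary search's value is an accident of
-- its probe order.
def Pre_dichoto (M : List (List Int)) (id : Int) (if_ : Int) (jd : Int) (jf : Int) (x : Int) : Prop :=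
  (min (if_ - id) (jf - jd) + 1).toNat ≤ 2 * M.length ∧
  ∀ i ∈ List.range (min (min (if_ - id) (jf - jd) + 1).toNat (2 * M.length)),
    PySem.List.pyGet? ((PySem.List.pyGet? M (id + (i : Int))).getD []) (jd + (i : Int)) ≠ none ∧
    ((i : Int) + 1 < min (if_ - id) (jf - jd) + 1 →
      pvDiag M id jd (i : Int) ≤ pvDiag M id jd ((i : Int) + 1))
instance (M : List (List Int)) (id : Int) (if_ : Int) (jd : Int) (jf : Int) (x : Int) : Decidable (Pre_dichoto M id if_ jd jf x) := by unfold Pre_dichoto; infer_instance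

def pvWitness_dichoto : List (List Int) × Int × Int × Int × Int × Int :=
  ([[1, 2], [3, 4]], 0, 1, 0, 1, 3)

def Spec_dichoto (M : List (List Int)) (id : Int) (if_ : Int) (jd : Int) (jf : Int) (x : Int) (out : Int) : Prop := out = dichoto_alt M id if_ jd jf x
instance (M : List (List Int)) (id : Int) (if_ : Int) (jd : Int) (jf : Int) (x : Int) (out : Int) : Decidable (Spec_dichoto M id if_ jd jf x out) := by unfold Spec_dichoto; infer_instance

-- ===== CLAIM (what is proved, stated in full; the proofs are below) =====
def Claim_equal_dichoto : Prop := ∀ (M : List (List Int)) (id : Int) (if_ : Int) (jd : Int) (jf : Int) (x : Int), Dom_dichoto M id if_ jd jf x → Pre_dichoto M id if_ jd jf x → Spec_dichoto M id if_ jd jf x (dichoto M id if_ jd jf x)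

-- ===== LEMMAS AND PROOFS =====

-- under the Pre_ monotonicity hypothesis, "x ≤ diagonal" is upward closed on [0, n)
lemma pvDiag_mono (M : List (List Int)) (id jd : Int) (n : Int)
    (hmono : ∀ i : Int, 0 ≤ i → i + 1 < n → pvDiag M id jd i ≤ pvDiag M id jd (i + 1)) :
    ∀ j k : Int, 0 ≤ j → j ≤ k → k < n → pvDiag M id jd j ≤ pvDiag M id jd k := by
  intro j k hj hjk hk
  obtain ⟨t, ht⟩ : ∃ t : Nat, k = j + t := ⟨(k - j).toNat, by omega⟩
  subst ht
  induction t with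
  | zero => simp
  | succ t ih =>
      have h1 : j + (t : Int) + 1 < n := by push_cast at hk ⊢; omega
      calc pvDiag M id jd j ≤ pvDiag M id jd (j + t) := ih (by omega) (by omega)
        _ ≤ pvDiag M id jd (j + t + 1) := hmono _ (by omega) h1
        _ = pvDiag M id jd (j + (t + 1 : Nat)) := by push_cast; ring_nf

-- invariant-style postcondition of A's binary-search loop
lemma dichotoGo_post (M : List (List Int)) (id jd x n : Int)
    (hup : ∀ j k : Int, 0 ≤ j → j ≤ k → k < n → pvDiag M id jd j ≤ pvDiag M id jd k) :
    ∀ g d : Int, 0 ≤ g → g ≤ d → d ≤ n →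
      (∀ j : Int, 0 ≤ j → j < g → ¬ x ≤ pvDiag M id jd j) →
      (∀ j : Int, d ≤ j → j < n → x ≤ pvDiag M id jd j) →
      0 ≤ dichotoGo M id jd x g d ∧ dichotoGo M id jd x g d ≤ n ∧
      (∀ j : Int, 0 ≤ j → j < dichotoGo M id jd x g d → ¬ x ≤ pvDiag M id jd j) ∧
      (∀ j : Int, dichotoGo M id jd x g d ≤ j → j < n → x ≤ pvDiag M id jd j) := by
  intro g d
  induction g, d using dichotoGo.induct M id jd x with
  | case1 g d h hle ih =>
      intro hg hgd hdn hlo hhi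
      have hm := PySem.Int.floordiv_two_mid_bounds (le_of_lt h)
      have hm2 : PySem.Int.floordiv (g + d) 2 < d :=
        (PySem.Int.floordiv_lt_iff_lt_mul (by omega)).mpr (by omega)
      rw [dichotoGo, dif_pos h, if_pos hle]
      refine ih hg (by omega) (by omega) hlo ?_
      intro j hj hjn
      exact le_trans hle (hup (PySem.Int.floordiv (g + d) 2) j (by omega) hj hjn)
  | case2 g d h hgt ih =>
      intro hg hgd hdn hlo hhi
      have hm := PySem.Int.floordiv_two_mid_bounds (le_of_lt h)
      have hm2 : PySem.Int.floordiv (g + d) 2 < d :=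
        (PySem.Int.floordiv_lt_iff_lt_mul (by omega)).mpr (by omega)
      rw [dichotoGo, dif_pos h, if_neg hgt]
      refine ih (by omega) (by omega) hdn ?_ hhi
      intro j hj hjm hxj
      exact hgt (le_trans hxj (hup j (PySem.Int.floordiv (g + d) 2) hj (by omega) (by omega)))
  | case3 g d h =>
      intro hg hgd hdn hlo hhi
      rw [dichotoGo, dif_neg h]
      exact ⟨hg, by omega, hlo, fun j hj hjn => hhi j (by omega) hjn⟩

-- B's fold counts exactly a elements when the predicate holds on [0,a) and fails on [a,n)
lemma count_below_eq (M : List (List Int)) (id jd x n a : Int)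
    (ha0 : 0 ≤ a) (han : a ≤ n)
    (hlo : ∀ j : Int, 0 ≤ j → j < a → pvDiag M id jd j < x)
    (hhi : ∀ j : Int, a ≤ j → j < n → ¬ pvDiag M id jd j < x) :
    (PySem.List.pyRange 0 n 1).foldl
      (fun acc i => if pvDiag M id jd i < x then acc + 1 else acc) 0 = a := by
  rw [PySem.List.foldl_ite_add_one]
  rw [PySem.List.pyRange_one_append 0 a n ha0 han, List.countP_append]
  have h1 : (PySem.List.pyRange 0 a 1).countP
      (fun i => decide (pvDiag M id jd i < x)) = (PySem.List.pyRange 0 a 1).length := by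
    apply List.countP_eq_length.mpr
    intro i hi
    have := (PySem.List.mem_pyRange_one).mp hi
    exact decide_eq_true (hlo i this.1 this.2)
  have h2 : (PySem.List.pyRange a n 1).countP
      (fun i => decide (pvDiag M id jd i < x)) = 0 := by
    apply List.countP_eq_zero.mpr
    intro i hi
    have := (PySem.List.mem_pyRange_one).mp hi
    simpa using hhi i this.1 this.2
  rw [h1, h2, PySem.List.length_pyRange_one]
  omega

-- ===== VERDICT (by name: the statement is the Claim_ definition above) =====
theorem dichoto_spec : Claim_equal_dichoto := by
  intro M id if_ jd jf x _ hpre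
  unfold Spec_dichoto dichoto dichoto_alt
  unfold Pre_dichoto at hpre
  obtain ⟨hbound, hpre⟩ := hpre
  set n := min (if_ - id) (jf - jd) + 1 with hn
  have hmono : ∀ i : Int, 0 ≤ i → i + 1 < n → pvDiag M id jd i ≤ pvDiag M id jd (i + 1) := by
    intro i hi hin
    have hmem : i.toNat ∈ List.range (min n.toNat (2 * M.length)) := by
      simp only [List.mem_range]; omega
    have := (hpre i.toNat hmem).2
    rw [show ((i.toNat : Int)) = i by omega] at this
    exact this (by omega)
  have hup := pvDiag_mono M id jd n hmono
  by_cases hpos : 0 ≤ n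
  · obtain ⟨ha0, ha1, ha2, ha3⟩ :=
      dichotoGo_post M id jd x n hup 0 n (le_refl 0) hpos (le_refl n)
        (fun j hj hjl => by omega) (fun j hj hjn => by omega)
    exact (count_below_eq M id jd x n _ ha0 ha1
      (fun j hj hja => lt_of_not_ge fun hge => ha2 j hj hja hge)
      (fun j hja hjn => not_lt.mpr (ha3 j hja hjn))).symm
  · have hnil : PySem.List.pyRange 0 n 1 = [] :=
      PySem.List.pyRange_one_eq_nil (by omega)
    rw [dichotoGo]
    simp only [show ¬ (0 : Int) < n by omega, dif_neg, not_false_iff, hnil, List.foldl_nil]
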